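-- pv_equiv track=rewrite | github.com/HoumanPashaei/graphql-path-query-builder | cli/gql_path_query_builder.py | pretty_graphql_query
-- ===== SOURCE A (Python) =====
-- from typing import Any, Dict, List, Set, Tuple
--
-- def pretty_graphql_query(compact: str, indent_size: int = 4, trailing_newline: bool = True) -> str:
--     s = (compact or "").strip()
--     if "{" not in s or "}" not in s:
--         return s
--
--     first = s.find("{")
--     last = s.rfind("}")
--     if first == -1 or last == -1 or last <= first:
--         return s
--
--     header = s[:first].strip()
--     inner = s[first + 1:last].strip()
--
--     spaced = inner.replace("{", " { ").replace("}", " } ")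
--     tokens = [t for t in spaced.split() if t]
--
--     out: List[str] = []
--     indent = 1
--
--     def ind(n: int) -> str:
--         return " " * (indent_size * n)
--
--     i = 0
--     out.append(f"{header} {{ \n")
--
--     while i < len(tokens):
--         tok = tokens[i]
--
--         if tok == "{":
--             out.append("{ \n")
--             indent += 1
--             i += 1
--             continue
--
--         if tok == "}":
--             indent -= 1
--             out.append(ind(indent) + "}\n")
--             i += 1
--             continue
--
--         if tok.endswith(":") and (i + 1) < len(tokens) and tokens[i + 1] not in ("{", "}"):
--             tok = tok + " " + tokens[i + 1]
--             i += 1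
--
--         if tok == "..." and (i + 2) < len(tokens) and tokens[i + 1] == "on" and tokens[i + 2] not in ("{", "}"):
--             tok = f"... on {tokens[i + 2]}"
--             i += 2
--
--         nxt = tokens[i + 1] if (i + 1) < len(tokens) else ""
--         if nxt == "{":
--             out.append(ind(indent) + tok + " ")
--         else:
--             out.append(ind(indent) + tok + "\n")
--
--         i += 1
--
--     out.append("}")
--     result = "".join(out)
--     if trailing_newline:
--         result += "\n"
--     return result
-- ===== SOURCE B (Python) =====
-- def pretty_graphql_query(compact: str, indent_size: int = 4, trailing_newline: bool = True) -> str: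
--     s = (compact or "").strip()
--     if "{" not in s or "}" not in s:
--         return s
--     first = s.find("{")
--     last = s.rfind("}")
--     if first == -1 or last == -1 or last <= first:
--         return s
--     header = s[:first].strip()
--     inner = s[first + 1:last].strip()
--     raw = [t for t in inner.replace("{", " { ").replace("}", " } ").split() if t]
--
--     # pass 1: merge the raw tokens into logical tokens ('{', '}', or a fully merged field)
--     logical = []
--     i, n = 0, len(raw)
--     while i < n:
--         t = raw[i]
--         if t not in ("{", "}"):
--             if t.endswith(":") and i + 1 < n and raw[i + 1] not in ("{", "}"):
--                 t = t + " " + raw[i + 1]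
--                 i += 1
--             elif t == "..." and i + 2 < n and raw[i + 1] == "on" and raw[i + 2] not in ("{", "}"):
--                 t = "... on " + raw[i + 2]
--                 i += 2
--         logical.append(t)
--         i += 1
--
--     # pass 2: single forward sweep, NO lookahead: a field is held pending and flushed
--     # with ' ' when a '{' follows it, with '\n' otherwise
--     pieces = [header + " { \n"]
--     indent = 1
--     pending = None
--     for t in logical:
--         if t == "{":
--             if pending is not None:
--                 pieces.append(pending + " ")
--                 pending = None
--             pieces.append("{ \n")
--             indent += 1
--         elif t == "}":
--             if pending is not None:
--                 pieces.append(pending + "\n")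
--                 pending = None
--             indent -= 1
--             pieces.append(" " * (indent_size * indent) + "}\n")
--         else:
--             if pending is not None:
--                 pieces.append(pending + "\n")
--             pending = " " * (indent_size * indent) + t
--     if pending is not None:
--         pieces.append(pending + "\n")
--     pieces.append("}")
--     result = "".join(pieces)
--     return result + "\n" if trailing_newline else result
-- ===== Notes on version B (the rewrite author's own statement) =====
-- stated objective: alternative
-- what changed: A's single while-loop that merges lookahead tokens and emits indented lines in one pass is replaced by a merge pass producing logical tokens followed by a lookahead-free state-machine sweep that holds each field pending and flushes it with a space or a newline depending on the token that follows.
import Mathlib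
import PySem

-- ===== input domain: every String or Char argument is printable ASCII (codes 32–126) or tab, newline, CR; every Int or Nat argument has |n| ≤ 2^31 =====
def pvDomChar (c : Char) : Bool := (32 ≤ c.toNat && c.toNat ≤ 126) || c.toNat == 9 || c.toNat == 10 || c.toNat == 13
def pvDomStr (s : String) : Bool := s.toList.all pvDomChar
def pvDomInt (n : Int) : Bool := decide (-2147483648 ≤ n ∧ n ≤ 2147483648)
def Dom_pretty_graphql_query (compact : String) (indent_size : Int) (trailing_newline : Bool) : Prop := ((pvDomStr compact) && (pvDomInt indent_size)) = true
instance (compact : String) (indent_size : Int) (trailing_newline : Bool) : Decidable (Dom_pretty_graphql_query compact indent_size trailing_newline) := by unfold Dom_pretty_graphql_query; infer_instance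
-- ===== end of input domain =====

-- B replaces A's single lookahead-merging print loop by a merge pass into logical tokens followed by a
-- lookahead-free pending-field state machine; same output, different algorithm (objective: alternative).

-- Python's " " * (indent_size * n): string repetition, empty for a non-positive count (exact).
def pvInd (isize : Int) (n : Int) : String := String.ofList (List.replicate (isize * n).toNat ' ')

-- ===== PORT A =====
-- A's second in-loop `if`: merge "..." with "on <Type>" (tok and i already past the first merge).
def pvMergeA2 (tok : String) (rest : List String) : String × List String :=
  match rest with
  | n1 :: n2 :: rest2 =>
    if tok = "..." ∧ n1 = "on" ∧ n2 ≠ "{" ∧ n2 ≠ "}" then ("... on " ++ n2, rest2) else (tok, rest)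
  | _ => (tok, rest)

-- A's first in-loop `if` (merge a "field:" with its argument token), then the second one;
-- returns the merged token and the remaining token list (i already advanced past the merge).
def pvMergeA (t : String) (rest : List String) : String × List String :=
  match rest with
  | n1 :: rest1 =>
    if PySem.Str.endswith t ":" = true ∧ n1 ≠ "{" ∧ n1 ≠ "}" then
      pvMergeA2 (t ++ " " ++ n1) rest1
    else pvMergeA2 t rest
  | [] => pvMergeA2 t rest

theorem pvMergeA2_len (tok : String) (rest : List String) : (pvMergeA2 tok rest).2.length ≤ rest.length := by
  unfold pvMergeA2
  split <;> (try split) <;> simp <;> omega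

theorem pvMergeA_len (t : String) (rest : List String) : (pvMergeA t rest).2.length ≤ rest.length := by
  unfold pvMergeA
  split
  · split
    · exact le_trans (pvMergeA2_len _ _) (by simp)
    · exact pvMergeA2_len _ _
  · exact pvMergeA2_len _ _

-- A's while loop: one token per step, the two merge rules inline, lookahead on the raw next token.
def pvLoopA (w : Int → String) : List String → Int → List String
  | [], _ => []
  | t :: rest, indent =>
    if t = "{" then "{ \n" :: pvLoopA w rest (indent + 1)
    else if t = "}" then (w (indent - 1) ++ "}\n") :: pvLoopA w rest (indent - 1)
    else
      (w indent ++ (pvMergeA t rest).1 ++ (if (pvMergeA t rest).2.headD "" = "{" then " " else "\n"))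
        :: pvLoopA w (pvMergeA t rest).2 indent
termination_by ts _ => ts.length
decreasing_by
  · simp
  · simp
  · exact Nat.lt_succ_of_le (pvMergeA_len t rest)

def pretty_graphql_query (compact : String) (indent_size : Int) (trailing_newline : Bool) : String :=
  let s := PySem.Str.strip compact  -- (compact or "") = compact for a str argument
  if ¬ PySem.Str.isIn "{" s = true ∨ ¬ PySem.Str.isIn "}" s = true then s
  else
    let first := PySem.Str.find s "{"
    let last := PySem.Str.rfind s "}"
    if first = -1 ∨ last = -1 ∨ last ≤ first then s
    else
      let header := PySem.Str.strip (PySem.Str.slice s none (some first))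
      let inner := PySem.Str.strip (PySem.Str.slice s (some (first + 1)) (some last))
      let spaced := PySem.Str.replace (PySem.Str.replace inner "{" " { ") "}" " } "
      let tokens := (PySem.Str.split₀ spaced).filter (fun t => t != "")
      let out := (header ++ " { \n") :: (pvLoopA (pvInd indent_size) tokens 1 ++ ["}"])
      let result := PySem.Str.join "" out
      if trailing_newline then result ++ "\n" else result

-- ===== PORT B =====
-- B pass 1, body of the non-brace branch (the if/elif chain): the logical token and the rest.
def pvMergeBStep (t : String) (rest : List String) : String × List String :=
  match rest with
  | n1 :: rest1 =>
    if PySem.Str.endswith t ":" = true ∧ n1 ≠ "{" ∧ n1 ≠ "}" then (t ++ " " ++ n1, rest1)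
    else
      match rest1 with
      | n2 :: rest2 =>
        if t = "..." ∧ n1 = "on" ∧ n2 ≠ "{" ∧ n2 ≠ "}" then ("... on " ++ n2, rest2)
        else (t, rest)
      | [] => (t, rest)
  | [] => (t, rest)

theorem pvMergeBStep_len (t : String) (rest : List String) : (pvMergeBStep t rest).2.length ≤ rest.length := by
  unfold pvMergeBStep
  split <;> (try split) <;> (try split) <;> (try split) <;> simp <;> omega

-- B pass 1: merge the raw tokens into logical tokens ('{', '}', or a fully merged field).
def pvMergeB : List String → List String
  | [] => []
  | t :: rest =>
    if t = "{" ∨ t = "}" then t :: pvMergeB rest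
    else (pvMergeBStep t rest).1 :: pvMergeB (pvMergeBStep t rest).2
termination_by ts => ts.length
decreasing_by
  · simp
  · exact Nat.lt_succ_of_le (pvMergeBStep_len t rest)

-- `if pending is not None: pieces.append(pending + "\n")` resp. `+ " "`.
def pvFlushNL : Option String → List String
  | none => []
  | some p => [p ++ "\n"]

def pvFlushSP : Option String → List String
  | none => []
  | some p => [p ++ " "]

-- B pass 2, one iteration of the for loop: state = (indent, pending field, pieces so far).
def pvEmitStep (w : Int → String) (st : Int × Option String × List String) (t : String) :
    Int × Option String × List String :=
  if t = "{" then (st.1 + 1, none, (st.2.2 ++ pvFlushSP st.2.1) ++ ["{ \n"])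
  else if t = "}" then (st.1 - 1, none, (st.2.2 ++ pvFlushNL st.2.1) ++ [w (st.1 - 1) ++ "}\n"])
  else (st.1, some (w st.1 ++ t), st.2.2 ++ pvFlushNL st.2.1)

def pretty_graphql_query_alt (compact : String) (indent_size : Int) (trailing_newline : Bool) : String :=
  let s := PySem.Str.strip compact
  if ¬ PySem.Str.isIn "{" s = true ∨ ¬ PySem.Str.isIn "}" s = true then s
  else
    let first := PySem.Str.find s "{"
    let last := PySem.Str.rfind s "}"
    if first = -1 ∨ last = -1 ∨ last ≤ first then s
    else
      let header := PySem.Str.strip (PySem.Str.slice s none (some first))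
      let inner := PySem.Str.strip (PySem.Str.slice s (some (first + 1)) (some last))
      let raw := (PySem.Str.split₀ (PySem.Str.replace (PySem.Str.replace inner "{" " { ") "}" " } ")).filter (fun t => t != "")
      let logical := pvMergeB raw
      let fin := logical.foldl (pvEmitStep (pvInd indent_size)) (1, none, [header ++ " { \n"])
      let result := PySem.Str.join "" ((fin.2.2 ++ pvFlushNL fin.2.1) ++ ["}"])
      if trailing_newline then result ++ "\n" else result

-- ===== PRECONDITION & SPEC =====
def Spec_pretty_graphql_query (compact : String) (indent_size : Int) (trailing_newline : Bool) (out : String) : Prop := out = pretty_graphql_query_alt compact indent_size trailing_newline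
instance (compact : String) (indent_size : Int) (trailing_newline : Bool) (out : String) : Decidable (Spec_pretty_graphql_query compact indent_size trailing_newline out) := by unfold Spec_pretty_graphql_query; infer_instance

-- ===== CLAIM (what is proved, stated in full; the proofs are below) =====
def Claim_equal_pretty_graphql_query : Prop := ∀ (compact : String) (indent_size : Int) (trailing_newline : Bool), Dom_pretty_graphql_query compact indent_size trailing_newline → Spec_pretty_graphql_query compact indent_size trailing_newline (pretty_graphql_query compact indent_size trailing_newline)

-- ===== LEMMAS AND PROOFS =====

-- A string of the shape x ++ " " ++ y can never equal a space-free string.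
theorem pv_space_ne (x y b : String) (hb : ' ' ∉ b.toList) : x ++ " " ++ y ≠ b := by
  intro he
  apply hb
  rw [← he]
  simp [String.toList_append]

theorem pv_ellipsis_ne (y b : String) (hb : ' ' ∉ b.toList) : "... on " ++ y ≠ b := by
  intro he
  apply hb
  rw [← he]
  simp [String.toList_append]

-- The "... on" merge keeps any non-(space-free-b) token not being b.
theorem pvMergeA2_fst_ne (tok : String) (rest : List String) (b : String)
    (hb : ' ' ∉ b.toList) (ht : tok ≠ b) : (pvMergeA2 tok rest).1 ≠ b := by
  unfold pvMergeA2
  split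
  · split
    · exact pv_ellipsis_ne _ _ hb
    · exact ht
  · exact ht

-- A token that was merged is never "..." (it contains a space).
theorem pvMergeA2_of_ne (tok : String) (rest : List String) (h : tok ≠ "...") :
    pvMergeA2 tok rest = (tok, rest) := by
  unfold pvMergeA2
  split
  · rw [if_neg (fun hc => h hc.1)]
  · rfl

-- The fully merged token keeps not being a brace (or any space-free string it differed from).
theorem pvMergeA_fst_ne (t : String) (rest : List String) (b : String)
    (hb : ' ' ∉ b.toList) (ht : t ≠ b) : (pvMergeA t rest).1 ≠ b := by
  unfold pvMergeA
  split
  · split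
    · exact pvMergeA2_fst_ne _ _ _ hb (pv_space_ne _ _ _ hb)
    · exact pvMergeA2_fst_ne _ _ _ hb ht
  · exact pvMergeA2_fst_ne _ _ _ hb ht

-- One step of B's if/elif chain computes exactly A's two sequential in-loop merges.
theorem pvMergeBStep_eq (t : String) (rest : List String) : pvMergeBStep t rest = pvMergeA t rest := by
  have hdots : ∀ x y : String, x ++ " " ++ y ≠ "..." := fun x y => pv_space_ne x y "..." (by decide)
  unfold pvMergeBStep pvMergeA
  cases rest with
  | nil => rfl
  | cons n1 rest1 =>
    dsimp only
    by_cases hc1 : PySem.Str.endswith t ":" = true ∧ n1 ≠ "{" ∧ n1 ≠ "}"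
    · rw [if_pos hc1, if_pos hc1, pvMergeA2_of_ne _ _ (hdots t n1)]
    · rw [if_neg hc1, if_neg hc1]
      cases rest1 with
      | nil => rfl
      | cons n2 rest2 =>
        dsimp only
        unfold pvMergeA2
        rfl

-- On a non-brace head, B's merge pass takes exactly one step of A's inline merge.
theorem pvMergeB_cons (t : String) (rest : List String) (h1 : t ≠ "{") (h2 : t ≠ "}") :
    pvMergeB (t :: rest) = (pvMergeA t rest).1 :: pvMergeB (pvMergeA t rest).2 := by
  rw [pvMergeB, if_neg (by simp [h1, h2]), pvMergeBStep_eq]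

-- The head of the merged list is "{" exactly when the head of the raw list is.
theorem pvMergeB_head (l : List String) : ((pvMergeB l).headD "" = "{") ↔ (l.headD "" = "{") := by
  cases l with
  | nil => rw [pvMergeB]
  | cons t rest =>
    by_cases hb : t = "{" ∨ t = "}"
    · rw [pvMergeB, if_pos hb]
      simp
    · have hb' := not_or.mp hb
      rw [pvMergeB_cons t rest hb'.1 hb'.2]
      simp only [List.headD_cons]
      exact iff_of_false (pvMergeA_fst_ne t rest "{" (by decide) hb'.1) hb'.1

-- Proof-only recursive characterisation of B's pending-field sweep.
def pvEmitRec (w : Int → String) : List String → Int → Option String → List String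
  | [], _, pend => pvFlushNL pend
  | t :: rest, indent, pend =>
    if t = "{" then pvFlushSP pend ++ ("{ \n" :: pvEmitRec w rest (indent + 1) none)
    else if t = "}" then pvFlushNL pend ++ ((w (indent - 1) ++ "}\n") :: pvEmitRec w rest (indent - 1) none)
    else pvFlushNL pend ++ pvEmitRec w rest indent (some (w indent ++ t))

-- The for-loop fold computes the recursive characterisation.
theorem pvEmit_foldl (w : Int → String) (l : List String) :
    ∀ (indent : Int) (pend : Option String) (acc : List String),
    (let fin := l.foldl (pvEmitStep w) (indent, pend, acc); fin.2.2 ++ pvFlushNL fin.2.1)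
      = acc ++ pvEmitRec w l indent pend := by
  induction l with
  | nil => intro indent pend acc; simp [pvEmitRec]
  | cons t rest ih =>
    intro indent pend acc
    by_cases h1 : t = "{"
    · simp only [List.foldl_cons, pvEmitStep, if_pos h1, ih, pvEmitRec, List.append_assoc,
        List.cons_append, List.nil_append]
    · by_cases h2 : t = "}"
      · simp only [List.foldl_cons, pvEmitStep, if_neg h1, if_pos h2, ih, pvEmitRec,
          List.append_assoc, List.cons_append, List.nil_append]
      · simp only [List.foldl_cons, pvEmitStep, if_neg h1, if_neg h2, ih, pvEmitRec,
          List.append_assoc]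

-- Flushing a pending field is exactly A's lookahead separator on the remaining logical list.
theorem pvEmitRec_some (w : Int → String) (l : List String) (indent : Int) (p : String) :
    pvEmitRec w l indent (some p)
      = (p ++ (if l.headD "" = "{" then " " else "\n")) :: pvEmitRec w l indent none := by
  cases l with
  | nil => simp [pvEmitRec, pvFlushNL]
  | cons t rest =>
    by_cases h1 : t = "{"
    · simp [pvEmitRec, h1, pvFlushSP, pvFlushNL]
    · by_cases h2 : t = "}"
      · simp [pvEmitRec, h1, h2, pvFlushSP, pvFlushNL]
      · simp [pvEmitRec, h1, h2, pvFlushSP, pvFlushNL]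

-- Lookahead emit over the logical list (bridge between A's loop and B's sweep; proof-only).
def pvEmitLook (w : Int → String) : List String → Int → List String
  | [], _ => []
  | t :: rest, indent =>
    if t = "{" then "{ \n" :: pvEmitLook w rest (indent + 1)
    else if t = "}" then (w (indent - 1) ++ "}\n") :: pvEmitLook w rest (indent - 1)
    else (w indent ++ t ++ (if rest.headD "" = "{" then " " else "\n")) :: pvEmitLook w rest indent

theorem pvEmitRec_eq_look (w : Int → String) (l : List String) :
    ∀ indent : Int, pvEmitRec w l indent none = pvEmitLook w l indent := by
  induction l with
  | nil => intro indent; rfl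
  | cons t rest ih =>
    intro indent
    by_cases h1 : t = "{"
    · simp [pvEmitRec, pvEmitLook, h1, pvFlushSP, ih]
    · by_cases h2 : t = "}"
      · simp [pvEmitRec, pvEmitLook, h1, h2, pvFlushNL, ih]
      · simp only [pvEmitRec, pvEmitLook, if_neg h1, if_neg h2, pvFlushNL, List.nil_append,
          pvEmitRec_some, ih, String.append_assoc]

-- Main invariant: A's single loop equals B's merge pass followed by the lookahead emit.
theorem pvLoopA_eq_look_aux (w : Int → String) : ∀ (n : Nat) (ts : List String), ts.length ≤ n →
    ∀ (indent : Int), pvLoopA w ts indent = pvEmitLook w (pvMergeB ts) indent := by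
  intro n
  induction n with
  | zero =>
    intro ts h indent
    have hts : ts = [] := List.eq_nil_of_length_eq_zero (Nat.le_zero.mp h)
    subst hts
    rw [pvLoopA, pvMergeB, pvEmitLook]
  | succ n ih =>
    intro ts h indent
    match ts with
    | [] => rw [pvLoopA, pvMergeB, pvEmitLook]
    | t :: rest =>
      have hr : rest.length ≤ n := by simpa using Nat.lt_succ_iff.mp (lt_of_lt_of_le (by simp) h)
      by_cases h1 : t = "{"
      · rw [pvLoopA, if_pos h1, pvMergeB, if_pos (Or.inl h1), pvEmitLook, if_pos h1,
          ih rest hr (indent + 1)]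
      · by_cases h2 : t = "}"
        · rw [pvLoopA, if_neg h1, if_pos h2, pvMergeB, if_pos (Or.inr h2), pvEmitLook,
            if_neg h1, if_pos h2, ih rest hr (indent - 1)]
        · rw [pvLoopA, if_neg h1, if_neg h2, pvMergeB_cons t rest h1 h2, pvEmitLook,
            if_neg (pvMergeA_fst_ne t rest "{" (by decide) h1),
            if_neg (pvMergeA_fst_ne t rest "}" (by decide) h2)]
          have hlen : (pvMergeA t rest).2.length ≤ n := le_trans (pvMergeA_len t rest) hr
          rw [ih (pvMergeA t rest).2 hlen indent]
          have hcond : ((pvMergeA t rest).2.headD "" = "{") = ((pvMergeB (pvMergeA t rest).2).headD "" = "{") :=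
            propext (pvMergeB_head (pvMergeA t rest).2).symm
          simp only [hcond]

theorem pvLoopA_eq_fold (w : Int → String) (ts : List String) (indent : Int) (acc : List String) :
    (let fin := (pvMergeB ts).foldl (pvEmitStep w) (indent, none, acc); fin.2.2 ++ pvFlushNL fin.2.1)
      = acc ++ pvLoopA w ts indent := by
  rw [pvEmit_foldl, pvEmitRec_eq_look, pvLoopA_eq_look_aux w ts.length ts le_rfl indent]

-- ===== VERDICT (by name: the statement is the Claim_ definition above) =====
theorem pretty_graphql_query_spec : Claim_equal_pretty_graphql_query := by
  intro compact indent_size trailing_newline _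
  unfold Spec_pretty_graphql_query pretty_graphql_query pretty_graphql_query_alt
  simp only [pvLoopA_eq_fold]
  simp [List.append_assoc]
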